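-- pv_equiv track=rewrite | github.com/yLexter/airflow | Teste.py | filter_paths
-- ===== SOURCE A (Python) =====
-- def filter_paths(paths, codigos):
--     paths_filtrados = []
--
--     for path in paths:
--         path_lower = path.lower()
--
--         for codigo in codigos:
--             codigo_lower = codigo.lower()
--             if codigo_lower in path_lower:
--                 paths_filtrados.append(path)
--                 break
--
--     return paths_filtrados
-- ===== SOURCE B (Python) =====
-- def filter_paths(paths, codigos):
--     # Inverted traversal: codes outer, paths inner; collect matched indices, then emit in order.
--     matched = set()
--     for codigo in codigos:
--         c = codigo.lower()
--         for i, path in enumerate(paths):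
--             if c in path.lower():
--                 matched.add(i)
--     return [path for i, path in enumerate(paths) if i in matched]
-- ===== Notes on version B (the rewrite author's own statement) =====
-- stated objective: alternative
-- what changed: Inverts the loop nesting: B iterates codes in the outer loop, marks matching path indices in a set, and emits the kept paths in one final ordered pass, instead of A's per-path inner scan with break.
import Mathlib
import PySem

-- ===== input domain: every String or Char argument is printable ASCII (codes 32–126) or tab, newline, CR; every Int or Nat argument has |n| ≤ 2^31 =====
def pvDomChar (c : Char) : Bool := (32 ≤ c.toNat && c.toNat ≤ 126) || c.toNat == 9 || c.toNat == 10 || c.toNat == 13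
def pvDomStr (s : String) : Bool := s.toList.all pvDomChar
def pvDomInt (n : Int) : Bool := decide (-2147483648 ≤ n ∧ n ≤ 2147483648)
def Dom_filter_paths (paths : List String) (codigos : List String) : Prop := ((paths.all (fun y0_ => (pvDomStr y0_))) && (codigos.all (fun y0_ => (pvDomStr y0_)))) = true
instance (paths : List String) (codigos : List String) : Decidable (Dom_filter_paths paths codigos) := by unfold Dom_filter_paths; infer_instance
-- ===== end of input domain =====

-- B inverts the loop nesting (codes outer, matched-index set, one final ordered pass); alternative structure, same return value.


-- ===== PORT A =====
-- inner 'for codigo in codigos: … break' loop of A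
def fpInnerA (path : String) (path_lower : String) (acc : List String) : List String → List String
  | [] => acc
  | codigo :: rest =>
    let codigo_lower := PySem.Str.lower codigo
    if PySem.Str.isIn codigo_lower path_lower then acc ++ [path]
    else fpInnerA path path_lower acc rest

def filter_paths (paths : List String) (codigos : List String) : List String :=
  paths.foldl (fun paths_filtrados path =>
    let path_lower := PySem.Str.lower path
    fpInnerA path path_lower paths_filtrados codigos) []

-- ===== PORT B =====
def filter_paths_alt (paths : List String) (codigos : List String) : List String :=
  let matched : PySem.Set Int :=
    codigos.foldl (fun matched codigo =>
      let c := PySem.Str.lower codigo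
      (PySem.List.enumerate paths 0).foldl (fun matched p =>
        if PySem.Str.isIn c (PySem.Str.lower p.2) then PySem.Set.add matched p.1 else matched) matched)
      PySem.Set.empty
  ((PySem.List.enumerate paths 0).filter (fun p => PySem.Set.contains matched p.1)).map (·.2)

-- ===== PRECONDITION & SPEC =====
def Spec_filter_paths (paths : List String) (codigos : List String) (out : List String) : Prop := out = filter_paths_alt paths codigos
instance (paths : List String) (codigos : List String) (out : List String) : Decidable (Spec_filter_paths paths codigos out) := by unfold Spec_filter_paths; infer_instance

-- ===== CLAIM (what is proved, stated in full; the proofs are below) =====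
def Claim_equal_filter_paths : Prop := ∀ (paths : List String) (codigos : List String), Dom_filter_paths paths codigos → Spec_filter_paths paths codigos (filter_paths paths codigos)

-- ===== LEMMAS AND PROOFS =====

-- the predicate both programs decide for each path
def fpPred (codigos : List String) (path : String) : Bool :=
  codigos.any (fun c => PySem.Str.isIn (PySem.Str.lower c) (PySem.Str.lower path))

theorem fpInnerA_eq (path : String) (acc : List String) (cs : List String) :
    fpInnerA path (PySem.Str.lower path) acc cs =
      if fpPred cs path then acc ++ [path] else acc := by
  induction cs with
  | nil => simp [fpInnerA, fpPred]
  | cons c rest ih =>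
    show (if PySem.Str.isIn (PySem.Str.lower c) (PySem.Str.lower path) then acc ++ [path]
      else fpInnerA path (PySem.Str.lower path) acc rest) = _
    by_cases h : PySem.Chars.isIn (PySem.Chars.lower c.toList) (PySem.Chars.lower path.toList) = true
    · rw [if_pos (by simp [h]), if_pos (by simp [fpPred, h])]
    · rw [if_neg (by simp [h]), ih]
      have : fpPred (c :: rest) path = fpPred rest path := by
        simp [fpPred, h]
      rw [this]

theorem filter_paths_eq_filter (paths codigos : List String) :
    filter_paths paths codigos = paths.filter (fpPred codigos) := by
  unfold filter_paths
  suffices h : ∀ acc, paths.foldl (fun acc path =>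
      fpInnerA path (PySem.Str.lower path) acc codigos) acc = acc ++ paths.filter (fpPred codigos) by
    simpa using h []
  induction paths with
  | nil => simp
  | cons p rest ih =>
    intro acc
    rw [List.foldl_cons, fpInnerA_eq, List.filter_cons]
    by_cases h : fpPred codigos p = true
    · rw [if_pos h, if_pos h, ih]
      simp
    · rw [if_neg h, if_neg h, ih]

-- inner fold of B: membership after marking one code
theorem mem_inner_fold (q : Int × String → Bool) (l : List (Int × String))
    (s : PySem.Set Int) (x : Int) :
    (x ∈ l.foldl (fun s p => if q p then PySem.Set.add s p.1 else s) s) ↔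
      x ∈ s ∨ ∃ p ∈ l, q p = true ∧ x = p.1 := by
  induction l generalizing s with
  | nil => simp
  | cons p rest ih =>
    simp only [List.foldl_cons]
    by_cases h : q p = true
    · simp only [h, if_true, ih, PySem.Set.mem_add]
      simp only [List.mem_cons]
      constructor
      · rintro (⟨hs | hx⟩ | ⟨p', hp', hq, hx⟩)
        · exact Or.inl hs
        · exact Or.inr ⟨p, Or.inl rfl, h, hx⟩
        · exact Or.inr ⟨p', Or.inr hp', hq, hx⟩
      · rintro (hs | ⟨p', hp' | hp', hq, hx⟩)
        · exact Or.inl (Or.inl hs)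
        · exact Or.inl (Or.inr (by rw [hp'] at hx; exact hx))
        · exact Or.inr ⟨p', hp', hq, hx⟩
    · simp only [h, ih, List.mem_cons]
      constructor
      · rintro (hs | ⟨p', hp', hq, hx⟩)
        · exact Or.inl hs
        · exact Or.inr ⟨p', Or.inr hp', hq, hx⟩
      · rintro (hs | ⟨p', hp' | hp', hq, hx⟩)
        · exact Or.inl hs
        · exact absurd hq (by rw [hp']; exact h)
        · exact Or.inr ⟨p', hp', hq, hx⟩

-- outer fold of B: membership in the final matched set
theorem mem_matched (paths codigos : List String) (s : PySem.Set Int) (x : Int) :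
    (x ∈ codigos.foldl (fun matched codigo =>
        (PySem.List.enumerate paths 0).foldl (fun matched p =>
          if PySem.Str.isIn (PySem.Str.lower codigo) (PySem.Str.lower p.2) then PySem.Set.add matched p.1 else matched) matched) s) ↔
      x ∈ s ∨ ∃ c ∈ codigos, ∃ p ∈ PySem.List.enumerate paths 0,
        PySem.Str.isIn (PySem.Str.lower c) (PySem.Str.lower p.2) = true ∧ x = p.1 := by
  induction codigos generalizing s with
  | nil => simp
  | cons c rest ih =>
    simp only [List.foldl_cons, ih, mem_inner_fold]
    simp only [List.mem_cons]
    constructor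
    · rintro (⟨h | ⟨p, hp, hq, hx⟩⟩ | ⟨c', hc', h⟩)
      · exact Or.inl h
      · exact Or.inr ⟨c, Or.inl rfl, p, hp, hq, hx⟩
      · exact Or.inr ⟨c', Or.inr hc', h⟩
    · rintro (h | ⟨c', hc' | hc', h⟩)
      · exact Or.inl (Or.inl h)
      · exact Or.inl (Or.inr (hc' ▸ h))
      · exact Or.inr ⟨c', hc', h⟩

-- a comprehension over enumerate filtering on the value only is a plain filter
theorem map_snd_filter_snd (q : String → Bool) (l : List (Int × String)) :
    (l.filter (fun p => q p.2)).map (·.2) = (l.map (·.2)).filter q := by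
  induction l with
  | nil => simp
  | cons p rest ih =>
    by_cases h : q p.2 = true
    · simp [h, ih]
    · simp [h, ih]

theorem filter_paths_alt_eq_filter (paths codigos : List String) :
    filter_paths_alt paths codigos = paths.filter (fpPred codigos) := by
  unfold filter_paths_alt
  simp only
  have hmem : ∀ p ∈ PySem.List.enumerate paths 0,
      (PySem.Set.contains (codigos.foldl (fun matched codigo =>
        (PySem.List.enumerate paths 0).foldl (fun matched q =>
          if PySem.Str.isIn (PySem.Str.lower codigo) (PySem.Str.lower q.2) then PySem.Set.add matched q.1 else matched) matched) PySem.Set.empty) p.1) = fpPred codigos p.2 := by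
    intro p hp
    rcases (PySem.List.mem_enumerate_iff _ _ _).mp hp with ⟨k, hk, rfl⟩
    simp only [PySem.Set.contains_eq_listContains, fpPred]
    rw [Bool.eq_iff_iff]
    simp only [List.contains_iff_mem, mem_matched, List.any_eq_true]
    constructor
    · rintro (h | ⟨c, hc, p', hp', hq, hx⟩)
      · simp [PySem.Set.empty] at h
      · rcases (PySem.List.mem_enumerate_iff _ _ _).mp hp' with ⟨k', hk', rfl⟩
        simp only [zero_add] at hx
        have : k = k' := by exact_mod_cast hx
        subst this
        exact ⟨c, hc, hq⟩
    · rintro ⟨c, hc, hq⟩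
      exact Or.inr ⟨c, hc, (0 + (k : Int), paths[k]), hp, hq, rfl⟩
  rw [List.filter_congr hmem, map_snd_filter_snd, PySem.List.map_snd_enumerate]

-- ===== VERDICT (by name: the statement is the Claim_ definition above) =====
theorem filter_paths_spec : Claim_equal_filter_paths := by
  intro paths codigos _
  unfold Spec_filter_paths
  rw [filter_paths_eq_filter, filter_paths_alt_eq_filter]
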